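-- pv_equiv track=rewrite | github.com/wasif946/cs50w-wiki | encyclopedia/utils.py | search_entries
-- ===== SOURCE A (Python) =====
-- def search_entries(query, entries):
--     """
--     Searches a list of entries for a given query.
--     Returns a list of entries whose titles exactly match the query (case-insensitive)
--     or whose titles contain the query as a substring (case-insensitive).
--
--     Args:
--         query (str): The search term.
--         entries (list): A list of strings, where each string is an entry title.
--
--     Returns:
--         list: A list of matching entry titles.
--     """
--     matching_entries = []
--     query_lower = query.lower()
--
--     # First, check for exact matches (case-insensitive)
--     for entry in entries:
--         if entry.lower() == query_lower:
--             return [entry] # If exact match, return only that entry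
--
--     # If no exact match, find entries that contain the query as a substring
--     for entry in entries:
--         if query_lower in entry.lower():
--             matching_entries.append(entry)
--
--     return matching_entries
-- ===== SOURCE B (Python) =====
-- def search_entries(query, entries):
--     query_lower = query.lower()
--     results = []
--     for entry in entries:
--         entry_lower = entry.lower()
--         if entry_lower == query_lower:
--             return [entry]  # exact match wins, discard collected substring matches
--         if query_lower in entry_lower:
--             results.append(entry)
--     return results
-- ===== Notes on version B (the rewrite author's own statement) =====
-- stated objective: alternative
-- what changed: Fuses A's two sequential passes into one loop that lowercases each entry once, returning [entry] immediately on an exact match and otherwise accumulating substring matches.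
import Mathlib
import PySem

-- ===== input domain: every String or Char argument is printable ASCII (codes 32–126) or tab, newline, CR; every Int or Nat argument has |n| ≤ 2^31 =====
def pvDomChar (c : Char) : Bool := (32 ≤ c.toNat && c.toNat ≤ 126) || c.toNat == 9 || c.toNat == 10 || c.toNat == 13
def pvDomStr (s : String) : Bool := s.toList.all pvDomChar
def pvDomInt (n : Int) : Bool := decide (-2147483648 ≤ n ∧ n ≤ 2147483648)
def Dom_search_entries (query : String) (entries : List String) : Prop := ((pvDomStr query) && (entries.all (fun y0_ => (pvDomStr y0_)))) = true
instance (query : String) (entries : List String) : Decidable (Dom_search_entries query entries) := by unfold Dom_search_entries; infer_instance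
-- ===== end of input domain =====

-- B fuses A's two sequential passes into one accumulator loop (exact match returns immediately); same results, alternative decomposition.


-- ===== PORT A =====
-- first loop with early return = List.find?; second append loop = List.filter
def search_entries (query : String) (entries : List String) : List String :=
  let query_lower := PySem.Str.lower query
  match entries.find? (fun entry => PySem.Str.lower entry == query_lower) with
  | some entry => [entry]
  | none => entries.filter (fun entry => PySem.Str.isIn query_lower (PySem.Str.lower entry))

-- ===== PORT B =====
-- single pass with an accumulator of substring matches; exact match returns [entry] at once
def searchAltLoop (ql : String) (acc : List String) : List String → List String
  | [] => acc
  | entry :: rest =>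
    let el := PySem.Str.lower entry
    if el == ql then [entry]
    else if PySem.Str.isIn ql el then searchAltLoop ql (acc ++ [entry]) rest
    else searchAltLoop ql acc rest

def search_entries_alt (query : String) (entries : List String) : List String :=
  searchAltLoop (PySem.Str.lower query) [] entries

-- ===== PRECONDITION & SPEC =====
def Spec_search_entries (query : String) (entries : List String) (out : List String) : Prop := out = search_entries_alt query entries
instance (query : String) (entries : List String) (out : List String) : Decidable (Spec_search_entries query entries out) := by unfold Spec_search_entries; infer_instance

-- ===== CLAIM (what is proved, stated in full; the proofs are below) =====
def Claim_equal_search_entries : Prop := ∀ (query : String) (entries : List String), Dom_search_entries query entries → Spec_search_entries query entries (search_entries query entries)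

-- ===== LEMMAS AND PROOFS =====
theorem searchAltLoop_eq (ql : String) (l : List String) : ∀ acc : List String,
    searchAltLoop ql acc l =
      match l.find? (fun entry => PySem.Str.lower entry == ql) with
      | some entry => [entry]
      | none => acc ++ l.filter (fun entry => PySem.Str.isIn ql (PySem.Str.lower entry)) := by
  induction l with
  | nil => intro acc; simp [searchAltLoop]
  | cons e rest ih =>
    intro acc
    by_cases hx : PySem.Str.lower e == ql
    · simp [searchAltLoop, hx, List.find?]
    · by_cases hs : PySem.Str.isIn ql (PySem.Str.lower e)
      all_goals
        simp only [PySem.Str.isIn_eq, PySem.Str.toList_lower] at hs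
        simp [searchAltLoop, hx, hs, List.find?, ih]
        try (cases h : rest.find? (fun entry => PySem.Str.lower entry == ql) <;> simp [hs])

-- ===== VERDICT (by name: the statement is the Claim_ definition above) =====
theorem search_entries_spec : Claim_equal_search_entries := by
  intro query entries _
  unfold Spec_search_entries search_entries search_entries_alt
  rw [searchAltLoop_eq]
  simp
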